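-- pv_equiv track=rewrite | github.com/nayakrujul/python-scripts | Unit Tests/RelativeFormulaMass/main.py | separate_molecule
-- ===== SOURCE A (Python) =====
-- from string import ascii_uppercase
--
-- def separate_molecule(molecule: str):
--
--     atoms = []
--     prev = 0
--     for index in range(len(molecule)):
--         if molecule[index] in ascii_uppercase and index > 0:
--             atoms.append(molecule[prev:index])
--             prev = index
--     atoms.append(molecule[prev:len(molecule)])
--     return atoms
-- ===== SOURCE B (Python) =====
-- from string import ascii_uppercase
--
-- def separate_molecule(molecule: str):
--     # Scan right-to-left, building atoms back-to-front character by character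
--     # (no indices, no slicing); the first character never starts a new atom.
--     if not molecule:
--         return ['']
--     done = []   # completed atoms, in reverse order
--     pend = []   # characters of the current atom, in reverse order
--     for ch in reversed(molecule[1:]):
--         pend.append(ch)
--         if ch in ascii_uppercase:
--             done.append(''.join(reversed(pend)))
--             pend = []
--     pend.append(molecule[0])
--     done.append(''.join(reversed(pend)))
--     done.reverse()
--     return done
-- ===== Notes on version B (the rewrite author's own statement) =====
-- stated objective: alternative
-- what changed: B scans the string right-to-left over reversed characters, assembling each atom character by character into a pending buffer and emitting completed atoms back-to-front (reversing once at the end), with no index arithmetic and no slicing, versus A's left-to-right index loop that slices the string between a mutable prev pointer and each uppercase position.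
import Mathlib
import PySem

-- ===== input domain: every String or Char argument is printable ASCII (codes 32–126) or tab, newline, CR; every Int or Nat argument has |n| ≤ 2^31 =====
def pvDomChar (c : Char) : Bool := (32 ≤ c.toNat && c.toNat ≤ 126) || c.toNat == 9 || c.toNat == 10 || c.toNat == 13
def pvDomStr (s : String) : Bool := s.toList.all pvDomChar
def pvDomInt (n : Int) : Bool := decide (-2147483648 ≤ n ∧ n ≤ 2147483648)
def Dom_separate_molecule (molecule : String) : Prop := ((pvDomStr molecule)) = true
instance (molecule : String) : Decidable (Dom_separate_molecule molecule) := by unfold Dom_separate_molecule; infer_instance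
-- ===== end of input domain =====

-- B scans the string right-to-left, building each atom character by character into a pending
-- buffer and emitting atoms back-to-front (no indices, no slicing), vs A's left-to-right
-- index loop that slices between a mutable prev pointer and each uppercase position; same cost.

-- string.ascii_uppercase (shared by both Pythons via the same import)
def ascii_uppercase : List Char := "ABCDEFGHIJKLMNOPQRSTUVWXYZ".toList

-- ===== PORT A =====
-- A's loop body: 'if molecule[index] in ascii_uppercase and index > 0: append slice; prev = index'
def stepA (s : List Char) (st : List String × Int) (index : Int) : List String × Int :=
  if ascii_uppercase.contains (PySem.List.pyGetD s index ' ') ∧ 0 < index then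
    (st.1 ++ [String.ofList (PySem.List.slice s (some st.2) (some index))], index)
  else st

def separate_molecule (molecule : String) : List String :=
  let s := molecule.toList
  let n : Int := s.length
  let st := (PySem.List.pyRange 0 n 1).foldl (stepA s) ([], 0)
  st.1 ++ [String.ofList (PySem.List.slice s (some st.2) (some n))]

-- ===== PORT B =====
-- B's loop body: 'pend.append(ch); if ch in ascii_uppercase: done.append(join(reversed(pend))); pend = []'
def stepB (st : List String × List Char) (ch : Char) : List String × List Char :=
  let pend := st.2 ++ [ch]
  if ascii_uppercase.contains ch then (st.1 ++ [String.ofList pend.reverse], [])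
  else (st.1, pend)

def separate_molecule_alt (molecule : String) : List String :=
  match molecule.toList with
  | [] => [""]
  | c0 :: rest =>
    let st := rest.reverse.foldl stepB ([], [])
    (st.1 ++ [String.ofList (st.2 ++ [c0]).reverse]).reverse

-- ===== PRECONDITION & SPEC =====
def Spec_separate_molecule (molecule : String) (out : List String) : Prop := out = separate_molecule_alt molecule
instance (molecule : String) (out : List String) : Decidable (Spec_separate_molecule molecule out) := by unfold Spec_separate_molecule; infer_instance

-- ===== CLAIM (what is proved, stated in full; the proofs are below) =====
def Claim_equal_separate_molecule : Prop := ∀ (molecule : String), Dom_separate_molecule molecule → Spec_separate_molecule molecule (separate_molecule molecule)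

-- ===== LEMMAS AND PROOFS =====

-- common structural spec: the atoms of a char list, cutting before every uppercase char
def consL (a : List Char) : List (List Char) → List (List Char)
  | [] => [a]
  | h :: t => (a ++ h) :: t

def g : List Char → List (List Char)
  | [] => [[]]
  | c :: cs => if ascii_uppercase.contains c then [] :: consL [c] (g cs) else consL [c] (g cs)

lemma consL_ne_nil (a : List Char) (L : List (List Char)) : consL a L ≠ [] := by
  cases L <;> simp [consL]

lemma consL_consL (a b : List Char) (L : List (List Char)) :
    consL a (consL b L) = consL (a ++ b) L := by
  cases L <;> simp [consL]

lemma g_ne_nil (cs : List Char) : g cs ≠ [] := by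
  cases cs with
  | nil => simp [g]
  | cons c cs => unfold g; split <;> simp [consL_ne_nil]

-- the segments cut at `cuts`, from `prev` up to `n` (A's result shape)
def segs (s : List Char) (prev : Int) (cuts : List Int) (n : Int) : List String :=
  match cuts with
  | [] => [String.ofList (PySem.List.slice s (some prev) (some n))]
  | c :: cs => String.ofList (PySem.List.slice s (some prev) (some c)) :: segs s c cs n

lemma loop_seg (s : List Char) (n : Int) (L : List Int) (hL : ∀ i ∈ L, 0 < i) :
    ∀ (atoms : List String) (prev : Int),
    (L.foldl (stepA s) (atoms, prev)).1 ++
      [String.ofList (PySem.List.slice s (some (L.foldl (stepA s) (atoms, prev)).2) (some n))]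
    = atoms ++ segs s prev
        (L.filter (fun i => ascii_uppercase.contains (PySem.List.pyGetD s i ' '))) n := by
  induction L with
  | nil => intro atoms prev; simp [segs]
  | cons i L ih =>
    intro atoms prev
    have hi : 0 < i := hL i (by simp)
    have hL' : ∀ j ∈ L, 0 < j := fun j hj => hL j (by simp [hj])
    by_cases hp : PySem.List.pyGetD s i ' ' ∈ ascii_uppercase
    · have hstep : stepA s (atoms, prev) i
          = (atoms ++ [String.ofList (PySem.List.slice s (some prev) (some i))], i) := by
        simp [stepA, hp, hi]
      have hfil : (i :: L).filter (fun i => ascii_uppercase.contains (PySem.List.pyGetD s i ' '))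
          = i :: L.filter (fun i => ascii_uppercase.contains (PySem.List.pyGetD s i ' ')) := by
        simp [hp]
      rw [List.foldl_cons, hstep, hfil,
          ih hL' (atoms ++ [String.ofList (PySem.List.slice s (some prev) (some i))]) i]
      simp [segs]
    · have hstep : stepA s (atoms, prev) i = (atoms, prev) := by
        simp [stepA, hp]
      have hfil : (i :: L).filter (fun i => ascii_uppercase.contains (PySem.List.pyGetD s i ' '))
          = L.filter (fun i => ascii_uppercase.contains (PySem.List.pyGetD s i ' ')) := by
        simp [hp]
      rw [List.foldl_cons, hstep, hfil]
      exact ih hL' atoms prev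

-- bridge: A's index/slice segments equal the structural spec on the dropped suffix
lemma bridge : ∀ (t s : List Char) (k prev : Nat), prev ≤ k → s.drop k = t → k ≤ s.length →
    segs s (prev : Int)
      ((PySem.List.pyRange (k : Int) (s.length : Int) 1).filter
        (fun i => ascii_uppercase.contains (PySem.List.pyGetD s i ' '))) (s.length : Int)
    = (consL ((s.drop prev).take (k - prev)) (g t)).map String.ofList := by
  intro t
  induction t with
  | nil =>
    intro s k prev hpk hdrop hk
    have hkl : s.length ≤ k := List.drop_eq_nil_iff.mp hdrop
    have hke : k = s.length := le_antisymm hk hkl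
    rw [PySem.List.pyRange_one_eq_nil (by exact_mod_cast hkl)]
    subst hke
    simp [segs, g, consL, PySem.List.slice_natCast]
  | cons c t ih =>
    intro s k prev hpk hdrop hk
    have hkl : k < s.length := by
      by_contra h
      rw [List.drop_eq_nil_iff.mpr (by omega)] at hdrop
      exact (List.cons_ne_nil c t) hdrop.symm
    have hc : s[k] = c := by
      rw [List.drop_eq_getElem_cons hkl] at hdrop
      exact (List.cons.injEq _ _ _ _ ▸ hdrop).1
    have hdrop' : s.drop (k + 1) = t := by
      rw [List.drop_eq_getElem_cons hkl] at hdrop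
      exact (List.cons.injEq _ _ _ _ ▸ hdrop).2
    have hget : PySem.List.pyGetD s (k : Int) ' ' = c := by
      rw [PySem.List.pyGetD_natCast, List.getD_eq_getElem s ' ' hkl, hc]
    have hrange : PySem.List.pyRange (k : Int) (s.length : Int) 1
        = (k : Int) :: PySem.List.pyRange ((k + 1 : Nat) : Int) (s.length : Int) 1 := by
      rw [PySem.List.pyRange_one_cons (by exact_mod_cast hkl)]
      norm_num
    have htake : (s.drop prev).take (k - prev) ++ [c] = (s.drop prev).take (k + 1 - prev) := by
      have h1 : k + 1 - prev = (k - prev) + 1 := by omega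
      rw [h1, List.take_add_one, List.getElem?_drop]
      have h2 : prev + (k - prev) = k := by omega
      rw [h2, List.getElem?_eq_getElem hkl, hc]
      rfl
    by_cases hp : c ∈ ascii_uppercase
    · have hfil : ((k : Int) :: PySem.List.pyRange ((k + 1 : Nat) : Int) (s.length : Int) 1).filter
          (fun i => ascii_uppercase.contains (PySem.List.pyGetD s i ' '))
          = (k : Int) :: (PySem.List.pyRange ((k + 1 : Nat) : Int) (s.length : Int) 1).filter
              (fun i => ascii_uppercase.contains (PySem.List.pyGetD s i ' ')) := by
        simp [hget, hp]
      rw [hrange, hfil]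
      show String.ofList (PySem.List.slice s (some (prev : Int)) (some (k : Int)))
          :: segs s (k : Int) _ _ = _
      rw [ih s (k + 1) k (by omega) hdrop' (by omega)]
      have hone : (s.drop k).take (k + 1 - k) = [c] := by
        have : k + 1 - k = 1 := by omega
        rw [this, hdrop]
        rfl
      rw [hone]
      have hg : g (c :: t) = [] :: consL [c] (g t) := by simp [g, hp]
      rw [hg]
      cases hG : g t with
      | nil => exact absurd hG (g_ne_nil t)
      | cons h T =>
        simp [consL, PySem.List.slice_natCast]
    · have hfil : ((k : Int) :: PySem.List.pyRange ((k + 1 : Nat) : Int) (s.length : Int) 1).filter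
          (fun i => ascii_uppercase.contains (PySem.List.pyGetD s i ' '))
          = (PySem.List.pyRange ((k + 1 : Nat) : Int) (s.length : Int) 1).filter
              (fun i => ascii_uppercase.contains (PySem.List.pyGetD s i ' ')) := by
        simp [hget, hp]
      rw [hrange, hfil, ih s (k + 1) prev (by omega) hdrop' (by omega)]
      have hg : g (c :: t) = consL [c] (g t) := by simp [g, hp]
      rw [hg, consL_consL, htake]

-- B's reverse fold computes (completed atoms reversed, pending chars reversed)
lemma bfold (cs : List Char) :
    cs.reverse.foldl stepB ([], []) =
      (((g cs).tail.map String.ofList).reverse, (g cs).headI.reverse) := by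
  induction cs with
  | nil => rfl
  | cons c cs ih =>
    rw [List.reverse_cons, List.foldl_append, ih]
    cases hG : g cs with
    | nil => exact absurd hG (g_ne_nil cs)
    | cons h T =>
      by_cases hp : c ∈ ascii_uppercase
      · simp [stepB, g, hG, consL, hp]
      · simp [stepB, g, hG, consL, hp]

theorem separate_molecule_spec : Claim_equal_separate_molecule := by
  intro molecule _
  unfold Spec_separate_molecule separate_molecule separate_molecule_alt
  simp only
  cases hs : molecule.toList with
  | nil => rfl
  | cons c0 rest =>
    set s := c0 :: rest with hsdef
    have hn : (0 : Int) < (s.length : Int) := by simp [hsdef]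
    rw [PySem.List.pyRange_one_cons hn, List.foldl_cons]
    have hstep0 : stepA s ([], 0) 0 = ([], 0) := by simp [stepA]
    rw [hstep0]
    have hA := loop_seg s (s.length : Int) (PySem.List.pyRange (0 + 1) (s.length : Int) 1)
      (fun i hi => by
        have := (PySem.List.mem_pyRange_one).1 hi
        omega) [] 0
    rw [hA]
    have h1 : ((0 : Int) + 1) = ((1 : Nat) : Int) := by norm_num
    have h0 : (0 : Int) = ((0 : Nat) : Int) := by norm_num
    rw [h1, h0, bridge rest s 1 0 (by omega) (by simp [hsdef]) (by simp [hsdef])]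
    -- B side
    simp only [hsdef]
    rw [bfold rest]
    cases hG : g rest with
    | nil => exact absurd hG (g_ne_nil rest)
    | cons h T =>
      simp [consL]
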